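-- pv_equiv track=rewrite | github.com/jonathonreilly/toy-physics | scripts/evolving_network_prototype.py | grow_network
-- ===== SOURCE A (Python) =====
-- def grow_network(
--     seed_nodes: set[tuple[int, int]],
--     growth_steps: int,
--     max_height: int = 20,
-- ) -> list[set[tuple[int, int]]]:
--     """Grow network from seed by adding frontier nodes at each step."""
--     snapshots = [set(seed_nodes)]
--     current = set(seed_nodes)
--
--     for _ in range(growth_steps):
--         frontier = set()
--         for node in current:
--             x, y = node
--             for dx in [-1, 0, 1]:
--                 for dy in [-1, 0, 1]:
--                     if dx == 0 and dy == 0: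
--                         continue
--                     nb = (x + dx, y + dy)
--                     if nb not in current and abs(nb[1]) <= max_height:
--                         frontier.add(nb)
--         current = current | frontier
--         snapshots.append(set(current))
--
--     return snapshots
-- ===== SOURCE B (Python) =====
-- _OFFSETS = ((-1, -1), (-1, 0), (-1, 1), (0, -1), (0, 1), (1, -1), (1, 0), (1, 1))
--
--
-- def grow_network(
--     seed_nodes: set[tuple[int, int]],
--     growth_steps: int,
--     max_height: int = 20,
-- ) -> list[set[tuple[int, int]]]:
--     """Track the last-added frontier: interior nodes (all of whose in-height
--     neighbours are already present) are skipped instead of re-expanded."""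
--     snapshots = [set(seed_nodes)]
--     current = set(seed_nodes)
--     frontier = set(current)  # the nodes added in the previous step
--     for _ in range(growth_steps):
--         new = set()
--         for node in current:
--             if node not in frontier:
--                 continue  # interior node: it can contribute nothing new
--             x, y = node
--             for dx, dy in _OFFSETS:
--                 nb = (x + dx, y + dy)
--                 if nb not in current and abs(nb[1]) <= max_height:
--                     new.add(nb)
--         current = current | new
--         frontier = new
--         snapshots.append(set(current))
--     return snapshots
-- ===== Notes on version B (the rewrite author's own statement) =====
-- stated objective: faster
-- what changed: B maintains the set of nodes added in the previous step and expands only those, skipping interior nodes whose in-height neighbors are provably already present, instead of re-expanding every node of the whole set each step.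
import Mathlib
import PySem

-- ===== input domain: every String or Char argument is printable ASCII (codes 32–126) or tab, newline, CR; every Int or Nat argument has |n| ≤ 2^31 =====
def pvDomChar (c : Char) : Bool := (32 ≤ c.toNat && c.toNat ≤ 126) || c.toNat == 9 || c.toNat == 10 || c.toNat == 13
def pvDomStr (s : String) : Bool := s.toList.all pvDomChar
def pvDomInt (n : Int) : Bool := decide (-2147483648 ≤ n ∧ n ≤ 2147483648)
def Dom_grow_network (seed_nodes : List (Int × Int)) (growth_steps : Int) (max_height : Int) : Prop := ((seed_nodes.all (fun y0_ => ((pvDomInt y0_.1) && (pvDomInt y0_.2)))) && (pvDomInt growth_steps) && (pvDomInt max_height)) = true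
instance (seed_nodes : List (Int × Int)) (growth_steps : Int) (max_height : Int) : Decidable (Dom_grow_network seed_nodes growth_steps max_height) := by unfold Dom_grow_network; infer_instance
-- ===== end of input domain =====

-- B tracks the previous step's frontier and skips (does not re-expand) interior nodes, whose
-- in-height neighbours are provably already present (objective: faster; measured).


-- ===== PORT A =====
-- inner 'for dx in [-1,0,1]: for dy in [-1,0,1]:' loops with the 'continue' on (0,0)
def expandNodeA (current : List (Int × Int)) (max_height : Int)
    (fr : List (Int × Int)) (node : Int × Int) : List (Int × Int) :=
  ([-1, 0, 1] : List Int).foldl (fun fr dx =>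
    ([-1, 0, 1] : List Int).foldl (fun fr dy =>
      if dx = 0 ∧ dy = 0 then fr
      else
        let nb : Int × Int := (node.1 + dx, node.2 + dy)
        if nb ∉ current ∧ |nb.2| ≤ max_height then PySem.Set.add fr nb else fr) fr) fr

-- one iteration of A's 'for _ in range(growth_steps)' body
def stepA (max_height : Int) (st : List (Int × Int) × List (List (Int × Int))) :
    List (Int × Int) × List (List (Int × Int)) :=
  let frontier := st.1.foldl (expandNodeA st.1 max_height) PySem.Set.empty
  let current' := PySem.Set.union st.1 frontier
  (current', st.2 ++ [current'])

def grow_network (seed_nodes : List (Int × Int)) (growth_steps : Int) (max_height : Int) : List (List (Int × Int)) :=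
  ((PySem.List.pyRange 0 growth_steps 1).foldl (fun st _ => stepA max_height st)
    (PySem.Set.ofList seed_nodes, [PySem.Set.ofList seed_nodes])).2

-- ===== PORT B =====
-- Source B's _OFFSETS tuple
def pvOffsets : List (Int × Int) :=
  [(-1, -1), (-1, 0), (-1, 1), (0, -1), (0, 1), (1, -1), (1, 0), (1, 1)]

-- body of 'for dx, dy in _OFFSETS:'
def tryAddB (current : List (Int × Int)) (max_height : Int) (node : Int × Int)
    (fr : List (Int × Int)) (d : Int × Int) : List (Int × Int) :=
  -- nb = (x + dx, y + dy), inlined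
  if (node.1 + d.1, node.2 + d.2) ∉ current ∧ |node.2 + d.2| ≤ max_height then
    PySem.Set.add fr (node.1 + d.1, node.2 + d.2)
  else fr

-- the 'for dx, dy in _OFFSETS:' loop
def expandNodeB (current : List (Int × Int)) (max_height : Int)
    (fr : List (Int × Int)) (node : Int × Int) : List (Int × Int) :=
  pvOffsets.foldl (tryAddB current max_height node) fr

-- one iteration of B's loop: 'if node not in frontier: continue' skips interior nodes
def stepB (max_height : Int)
    (st : List (Int × Int) × List (Int × Int) × List (List (Int × Int))) :
    List (Int × Int) × List (Int × Int) × List (List (Int × Int)) :=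
  let nw := st.1.foldl
    (fun acc node => if node ∉ st.2.1 then acc else expandNodeB st.1 max_height acc node)
    PySem.Set.empty
  let current' := PySem.Set.union st.1 nw
  (current', nw, st.2.2 ++ [current'])

def grow_network_alt (seed_nodes : List (Int × Int)) (growth_steps : Int) (max_height : Int) : List (List (Int × Int)) :=
  ((PySem.List.pyRange 0 growth_steps 1).foldl (fun st _ => stepB max_height st)
    (PySem.Set.ofList seed_nodes, PySem.Set.ofList seed_nodes, [PySem.Set.ofList seed_nodes])).2.2

-- ===== PRECONDITION & SPEC =====
def Spec_grow_network (seed_nodes : List (Int × Int)) (growth_steps : Int) (max_height : Int) (out : List (List (Int × Int))) : Prop := out = grow_network_alt seed_nodes growth_steps max_height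
instance (seed_nodes : List (Int × Int)) (growth_steps : Int) (max_height : Int) (out : List (List (Int × Int))) : Decidable (Spec_grow_network seed_nodes growth_steps max_height out) := by unfold Spec_grow_network; infer_instance

-- ===== CLAIM (what is proved, stated in full; the proofs are below) =====
def Claim_equal_grow_network : Prop := ∀ (seed_nodes : List (Int × Int)) (growth_steps : Int) (max_height : Int), Dom_grow_network seed_nodes growth_steps max_height → Spec_grow_network seed_nodes growth_steps max_height (grow_network seed_nodes growth_steps max_height)

-- ===== LEMMAS AND PROOFS =====

-- every in-height neighbour of every interior node (in `cur`, not in `fr`) is already in `cur`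
def Interior (max_height : Int) (cur fr : List (Int × Int)) : Prop :=
  ∀ p ∈ cur, p ∉ fr → ∀ d ∈ pvOffsets, |p.2 + d.2| ≤ max_height → (p.1 + d.1, p.2 + d.2) ∈ cur

-- A's nested dx/dy loops compute the same fold as B's loop over the 8 offsets
theorem expandA_eq_expandB (cur : List (Int × Int)) (H : Int) (fr : List (Int × Int)) (node : Int × Int) :
    expandNodeA cur H fr node = expandNodeB cur H fr node := by
  simp [expandNodeA, expandNodeB, tryAddB, pvOffsets, List.foldl]

theorem mem_tryAddB_of_mem (cur : List (Int × Int)) (H : Int) (node : Int × Int)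
    {fr : List (Int × Int)} {a : Int × Int} (d : Int × Int) (h : a ∈ fr) :
    a ∈ tryAddB cur H node fr d := by
  unfold tryAddB
  split
  · exact (PySem.Set.mem_add _ _ _).2 (Or.inl h)
  · exact h

theorem mem_expandB_of_mem (cur : List (Int × Int)) (H : Int) (node : Int × Int)
    {fr : List (Int × Int)} {a : Int × Int} (h : a ∈ fr) :
    a ∈ expandNodeB cur H fr node := by
  unfold expandNodeB
  have aux : ∀ (offs : List (Int × Int)) (fr : List (Int × Int)), a ∈ fr →
      a ∈ offs.foldl (tryAddB cur H node) fr := by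
    intro offs
    induction offs with
    | nil => intro fr h; exact h
    | cons d t ih => intro fr h; exact ih _ (mem_tryAddB_of_mem cur H node d h)
  exact aux pvOffsets fr h

-- completeness over the 8 offsets: a qualifying neighbour ends up in the result
theorem mem_expandB_complete (cur : List (Int × Int)) (H : Int) (node : Int × Int)
    {d : Int × Int} (hd : d ∈ pvOffsets)
    (hnb : (node.1 + d.1, node.2 + d.2) ∉ cur ∧ |node.2 + d.2| ≤ H) :
    ∀ fr, (node.1 + d.1, node.2 + d.2) ∈ expandNodeB cur H fr node := by
  unfold expandNodeB
  have aux : ∀ (offs : List (Int × Int)), d ∈ offs →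
      ∀ fr, (node.1 + d.1, node.2 + d.2) ∈ offs.foldl (tryAddB cur H node) fr := by
    intro offs
    induction offs with
    | nil => intro h; cases h
    | cons e t ih =>
      intro hmem fr
      rcases List.mem_cons.1 hmem with h | h
      · subst h
        have h1 : (node.1 + d.1, node.2 + d.2) ∈ tryAddB cur H node fr d := by
          unfold tryAddB
          rw [if_pos hnb]
          exact (PySem.Set.mem_add _ _ _).2 (Or.inr rfl)
        have aux2 : ∀ (t' : List (Int × Int)) (fr' : List (Int × Int)),
            (node.1 + d.1, node.2 + d.2) ∈ fr' →
            (node.1 + d.1, node.2 + d.2) ∈ t'.foldl (tryAddB cur H node) fr' := by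
          intro t'
          induction t' with
          | nil => intro fr' h; exact h
          | cons e' t'' ih' => intro fr' h; exact ih' _ (mem_tryAddB_of_mem cur H node e' h)
        exact aux2 t _ h1
      · exact ih h _
  exact aux pvOffsets hd

-- a node all of whose in-height neighbours are already present adds nothing
theorem expandB_noop (cur : List (Int × Int)) (H : Int) (fr : List (Int × Int)) {node : Int × Int}
    (h : ∀ d ∈ pvOffsets, |node.2 + d.2| ≤ H → (node.1 + d.1, node.2 + d.2) ∈ cur) :
    expandNodeB cur H fr node = fr := by
  unfold expandNodeB
  have aux : ∀ (offs : List (Int × Int)),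
      (∀ d ∈ offs, |node.2 + d.2| ≤ H → (node.1 + d.1, node.2 + d.2) ∈ cur) →
      ∀ fr, offs.foldl (tryAddB cur H node) fr = fr := by
    intro offs
    induction offs with
    | nil => intro _ fr; rfl
    | cons d t ih =>
      intro hh fr
      have hd : tryAddB cur H node fr d = fr := by
        unfold tryAddB
        rw [if_neg]
        rintro ⟨hnin, hht⟩
        exact hnin (hh d (List.mem_cons_self) hht)
      rw [List.foldl_cons, hd]
      exact ih (fun e he => hh e (List.mem_cons_of_mem _ he)) fr
  exact aux pvOffsets h fr

-- monotonicity of B's guarded per-node fold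
theorem mem_guarded_fold_of_mem (cur fr : List (Int × Int)) (H : Int)
    (nodes : List (Int × Int)) {acc : List (Int × Int)} {a : Int × Int} (h : a ∈ acc) :
    a ∈ nodes.foldl
      (fun acc node => if node ∉ fr then acc else expandNodeB cur H acc node) acc := by
  induction nodes generalizing acc with
  | nil => exact h
  | cons p t ih =>
    refine ih ?_
    by_cases hp : p ∉ fr
    · simpa [hp] using h
    · simpa [hp] using mem_expandB_of_mem cur H p h

-- completeness of B's guarded fold: a qualifying neighbour of a frontier node in `nodes` is produced
theorem mem_guarded_fold_complete (cur fr : List (Int × Int)) (H : Int)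
    (nodes : List (Int × Int)) {p : Int × Int} (hp : p ∈ nodes) (hpf : p ∈ fr)
    {d : Int × Int} (hd : d ∈ pvOffsets)
    (hnb : (p.1 + d.1, p.2 + d.2) ∉ cur ∧ |p.2 + d.2| ≤ H) :
    ∀ acc, (p.1 + d.1, p.2 + d.2) ∈ nodes.foldl
      (fun acc node => if node ∉ fr then acc else expandNodeB cur H acc node) acc := by
  induction nodes with
  | nil => cases hp
  | cons q t ih =>
    rcases List.mem_cons.1 hp with h | h
    · subst h
      intro acc
      refine mem_guarded_fold_of_mem cur fr H t ?_
      simpa [hpf] using mem_expandB_complete cur H p hd hnb acc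
    · intro acc
      exact ih h _

-- on an Interior-closed state, A's full scan computes exactly B's guarded scan
theorem scan_eq (cur fr : List (Int × Int)) (H : Int)
    (nodes : List (Int × Int))
    (hcl : ∀ p ∈ nodes, p ∉ fr → ∀ d ∈ pvOffsets, |p.2 + d.2| ≤ H → (p.1 + d.1, p.2 + d.2) ∈ cur) :
    ∀ acc, nodes.foldl (expandNodeB cur H) acc =
      nodes.foldl (fun acc node => if node ∉ fr then acc else expandNodeB cur H acc node) acc := by
  induction nodes with
  | nil => intro acc; rfl
  | cons p t ih =>
    intro acc
    rw [List.foldl_cons, List.foldl_cons]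
    have hstep : expandNodeB cur H acc p =
        (if p ∉ fr then acc else expandNodeB cur H acc p) := by
      by_cases hpf : p ∉ fr
      · rw [if_pos hpf, expandB_noop cur H acc (hcl p List.mem_cons_self hpf)]
      · rw [if_neg hpf]
    rw [← hstep]
    exact ih (fun q hq => hcl q (List.mem_cons_of_mem _ hq)) _

-- the main simulation: A's fold state tracks (current, snapshots) of B's fold state
theorem fold_sim (H : Int) (l : List Int) :
    ∀ (cur fr : List (Int × Int)) (snap : List (List (Int × Int))),
    Interior H cur fr →
    l.foldl (fun st _ => stepA H st) (cur, snap) =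
      ((l.foldl (fun st _ => stepB H st) (cur, fr, snap)).1,
       (l.foldl (fun st _ => stepB H st) (cur, fr, snap)).2.2) := by
  induction l with
  | nil => intro cur fr snap _; rfl
  | cons i t ih =>
    intro cur fr snap hcl
    rw [List.foldl_cons, List.foldl_cons]
    -- the new nodes computed by B's guarded scan
    set nw := cur.foldl
      (fun acc node => if node ∉ fr then acc else expandNodeB cur H acc node)
      PySem.Set.empty with hnw
    have hAfr : cur.foldl (expandNodeA cur H) PySem.Set.empty = nw := by
      have hAB : expandNodeA cur H = expandNodeB cur H :=
        funext fun fr => funext fun node => expandA_eq_expandB cur H fr node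
      rw [hAB, hnw]
      exact scan_eq cur fr H cur (fun p hp => hcl p hp) PySem.Set.empty
    have hstepA : stepA H (cur, snap) =
        (PySem.Set.union cur nw, snap ++ [PySem.Set.union cur nw]) := by
      simp only [stepA, hAfr]
    have hstepB : stepB H (cur, fr, snap) =
        (PySem.Set.union cur nw, nw, snap ++ [PySem.Set.union cur nw]) := rfl
    rw [hstepA, hstepB]
    -- the Interior invariant is preserved
    have hcl' : Interior H (PySem.Set.union cur nw) nw := by
      intro p hp hpnw d hd hht
      have hpc : p ∈ cur := by
        rcases (PySem.Set.mem_union _ _ _).1 hp with h | h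
        · exact h
        · exact absurd h hpnw
      by_cases hpf : p ∈ fr
      · by_cases hin : (p.1 + d.1, p.2 + d.2) ∈ cur
        · exact (PySem.Set.mem_union _ _ _).2 (Or.inl hin)
        · refine (PySem.Set.mem_union _ _ _).2 (Or.inr ?_)
          rw [hnw]
          exact mem_guarded_fold_complete cur fr H cur hpc hpf hd ⟨hin, hht⟩ PySem.Set.empty
      · exact (PySem.Set.mem_union _ _ _).2 (Or.inl (hcl p hpc hpf d hd hht))
    exact ih (PySem.Set.union cur nw) nw (snap ++ [PySem.Set.union cur nw]) hcl'

-- ===== VERDICT (by name: the statement is the Claim_ definition above) =====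
theorem grow_network_spec : Claim_equal_grow_network := by
  intro seed_nodes growth_steps max_height _
  unfold Spec_grow_network grow_network grow_network_alt
  rw [fold_sim max_height (PySem.List.pyRange 0 growth_steps 1)
    (PySem.Set.ofList seed_nodes) (PySem.Set.ofList seed_nodes)
    [PySem.Set.ofList seed_nodes]
    (fun p hp hpf => absurd hp hpf)]
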